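-- pv_equiv track=rewrite | github.com/YenChengLai/python-performance | cases/mac_device_mapping/performance.py | traverse_device_iterative
-- ===== SOURCE A (Python) =====
-- def traverse_device_iterative(child_dict: dict[str, list[str]], device_id: str) -> str:
--     stack = [device_id]
--     last_device = device_id
--
--     while stack:
--         current = stack.pop()
--         if current in child_dict:
--             stack.extend(child_dict[current])
--             last_device = current
--
--     return last_device
-- ===== SOURCE B (Python) =====
-- def traverse_device_iterative(child_dict: dict[str, list[str]], device_id: str) -> str:
--     # Recursive DFS threading the "last node that had children" accumulator.
--     # Children are visited in reversed order so the visit sequence equals the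
--     # LIFO pop order of the iterative version.
--     def go(node: str, acc: str) -> str:
--         children = child_dict.get(node)
--         if children is None:
--             return acc
--         acc = node
--         for c in reversed(children):
--             acc = go(c, acc)
--         return acc
--
--     return go(device_id, device_id)
-- ===== Notes on version B (the rewrite author's own statement) =====
-- stated objective: alternative
-- what changed: The explicit-stack while loop is replaced by a recursive DFS helper that threads the 'last node with children' accumulator and recurses on reversed child lists, so the visit sequence equals A's LIFO pop order.
import Mathlib
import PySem

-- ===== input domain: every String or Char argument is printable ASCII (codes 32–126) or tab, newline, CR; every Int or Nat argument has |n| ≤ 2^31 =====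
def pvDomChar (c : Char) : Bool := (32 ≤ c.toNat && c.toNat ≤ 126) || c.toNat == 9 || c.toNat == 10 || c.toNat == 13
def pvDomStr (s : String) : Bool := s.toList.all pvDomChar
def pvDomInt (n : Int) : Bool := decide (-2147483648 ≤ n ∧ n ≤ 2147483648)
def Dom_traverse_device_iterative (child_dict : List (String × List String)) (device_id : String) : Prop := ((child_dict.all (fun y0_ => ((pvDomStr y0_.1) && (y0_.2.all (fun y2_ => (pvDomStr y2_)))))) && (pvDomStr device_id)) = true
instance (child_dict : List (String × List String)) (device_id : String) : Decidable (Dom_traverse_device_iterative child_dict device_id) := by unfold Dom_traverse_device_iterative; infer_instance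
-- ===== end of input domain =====

-- B's change (one line): the explicit-stack while loop becomes a recursive DFS threading the
-- "last node with children" accumulator, recursing on reversed child lists (same visit order).

-- Both ports use the same fuel budget, a closed-form over-approximation of the number of stack
-- pops on any input where Python's loop terminates (the loop diverges on inputs with a cycle
-- reachable from device_id); fuel is a totality guard only, decremented once per pop / per call,
-- identically in both ports, and the equivalence is proved for every fuel value.
def pvFuel (child_dict : List (String × List String)) : Nat :=
  (child_dict.length + 2) *
    ((child_dict.foldl (fun m p => max m p.2.length) 1) + 1) ^ (child_dict.length + 1) + 1

-- ===== PORT A =====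
-- the while loop; stack head = Python stack top, so `stack.extend(cs)` is `cs.reverse ++ s`
def pvLoopA (d : PySem.Dict String (List String)) : Nat → List String → String → String
  | _, [], last => last
  | 0, _ :: _, last => last
  | f + 1, c :: s, last =>
    match d.get? c with
    | some cs => pvLoopA d f (cs.reverse ++ s) c
    | none => pvLoopA d f s last

def traverse_device_iterative (child_dict : List (String × List String)) (device_id : String) : String :=
  pvLoopA (PySem.Dict.ofList child_dict) (pvFuel child_dict) [device_id] device_id

-- ===== PORT B =====
-- recursive DFS `go(node, acc)` of Source B, with the fuel (one unit per call, like one unit per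
-- pop in A) threaded through the children fold; `min p.2 f` only witnesses termination
lemma pvLexMin (a f x y : Nat) (hxy : x < y) :
    Prod.Lex (· < ·) (· < ·) (min a f, x) (f, y) := by
  rcases Nat.lt_or_eq_of_le (Nat.min_le_right a f) with h | h
  · exact Prod.Lex.left _ _ h
  · rw [h]; exact Prod.Lex.right _ hxy

mutual
def pvGo (d : PySem.Dict String (List String)) : Nat → String → String → String × Nat
  | 0, _, acc => (acc, 0)
  | f + 1, n, acc =>
    match d.get? n with
    | none => (acc, f)
    | some cs => pvGoL d f cs.reverse n
  termination_by f _ _ => (f, 0)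
  decreasing_by exact Prod.Lex.left _ _ (Nat.lt_succ_self _)

def pvGoL (d : PySem.Dict String (List String)) : Nat → List String → String → String × Nat
  | f, [], acc => (acc, f)
  | f, c :: cs, acc =>
    let p := pvGo d f c acc
    pvGoL d (min p.2 f) cs p.1
  termination_by f cs _ => (f, cs.length + 1)
  decreasing_by
  · exact Prod.Lex.right _ (by simp)
  · exact pvLexMin _ _ _ _ (by simp)
end

def traverse_device_iterative_alt (child_dict : List (String × List String)) (device_id : String) : String :=
  (pvGo (PySem.Dict.ofList child_dict) (pvFuel child_dict) device_id device_id).1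

-- ===== PRECONDITION & SPEC =====
def Spec_traverse_device_iterative (child_dict : List (String × List String)) (device_id : String) (out : String) : Prop := out = traverse_device_iterative_alt child_dict device_id
instance (child_dict : List (String × List String)) (device_id : String) (out : String) : Decidable (Spec_traverse_device_iterative child_dict device_id out) := by unfold Spec_traverse_device_iterative; infer_instance

-- ===== CLAIM (what is proved, stated in full; the proofs are below) =====
def Claim_equal_traverse_device_iterative : Prop := ∀ (child_dict : List (String × List String)) (device_id : String), Dom_traverse_device_iterative child_dict device_id → Spec_traverse_device_iterative child_dict device_id (traverse_device_iterative child_dict device_id)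

-- ===== LEMMAS AND PROOFS =====
lemma pvGoL_fuel_le (d : PySem.Dict String (List String)) :
    ∀ (ns : List String) (f : Nat) (acc : String), (pvGoL d f ns acc).2 ≤ f := by
  intro ns
  induction ns with
  | nil => intro f acc; simp [pvGoL]
  | cons c cs ih =>
    intro f acc
    rw [pvGoL]
    exact le_trans (ih _ _) (Nat.min_le_right _ _)

lemma pvGoL_zero (d : PySem.Dict String (List String)) :
    ∀ (ns : List String) (acc : String), pvGoL d 0 ns acc = (acc, 0) := by
  intro ns
  induction ns with
  | nil => intro acc; simp [pvGoL]
  | cons c cs ih => intro acc; rw [pvGoL]; simp [pvGo, ih]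

lemma pvLoopA_zero (d : PySem.Dict String (List String)) (s : List String) (last : String) :
    pvLoopA d 0 s last = last := by
  cases s <;> simp [pvLoopA]

-- the bridge: running the stack loop on `ns ++ s` first runs B's recursion over `ns`,
-- then continues on `s` with the accumulator and fuel the recursion returns
lemma pvBridge (d : PySem.Dict String (List String)) :
    ∀ (f : Nat) (ns s : List String) (acc : String),
      pvLoopA d f (ns ++ s) acc
        = pvLoopA d (pvGoL d f ns acc).2 s (pvGoL d f ns acc).1 := by
  intro f
  induction f using Nat.strong_induction_on with
  | _ f ih =>
    intro ns s acc
    cases ns with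
    | nil => simp [pvGoL]
    | cons c cs =>
      cases f with
      | zero =>
        rw [pvGoL_zero]
        rw [pvLoopA_zero, pvLoopA_zero]
      | succ f' =>
        rw [pvGoL]
        simp only [List.cons_append]
        rw [pvLoopA, pvGo]
        cases hg : d.get? c with
        | none =>
          simp only [Nat.min_eq_left (Nat.le_succ f')]
          exact ih f' (Nat.lt_succ_self _) cs s acc
        | some cc =>
          dsimp only
          rw [ih f' (Nat.lt_succ_self _) cc.reverse (cs ++ s) c]
          have hle : (pvGoL d f' cc.reverse c).2 ≤ f' := pvGoL_fuel_le d _ _ _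
          rw [Nat.min_eq_left (le_trans hle (Nat.le_succ f'))]
          exact ih _ (Nat.lt_succ_of_le hle) cs s _

-- ===== VERDICT (by name: the statement is the Claim_ definition above) =====
theorem traverse_device_iterative_spec : Claim_equal_traverse_device_iterative := by
  intro child_dict device_id _
  unfold Spec_traverse_device_iterative traverse_device_iterative traverse_device_iterative_alt
  have h := pvBridge (PySem.Dict.ofList child_dict) (pvFuel child_dict) [device_id] [] device_id
  simp only [List.append_nil] at h
  rw [h]
  rw [pvGoL, pvGoL]
  simp [pvLoopA]
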